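-- pv_equiv track=rewrite | github.com/Oshalb/HackerRank | foodbar.py | give_order
-- ===== SOURCE A (Python) =====
-- def give_order(d):
--     ld = len(d)
--     for i in range(1, ld + 1):
--         d[i] = sum(d[i])
--     nd = {}
--     for key, value in d.items():
--         if value in nd:
--             nd[value].append(key)
--         else:
--             nd[value] = [key]
--     snd = sorted(nd)
--     r = []
--     for i in snd:
--         for j in nd[i]:
--             r.append(j)
--     return r
-- ===== SOURCE B (Python) =====
-- def give_order(d):
--     # Same in-place mutation as A: replace each list value by its sum.
--     for i in range(1, len(d) + 1):
--         d[i] = sum(d[i])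
--     # One stable sort of the keys (in dict insertion order) by their summed
--     # value replaces A's group-by-sum dict and its concatenation loops:
--     # stability gives the same tie-breaking (insertion order within equal sums).
--     return sorted(d, key=lambda k: d[k])
-- ===== Notes on version B (the rewrite author's own statement) =====
-- stated objective: simpler
-- what changed: A's group-by-sum dictionary, sorted distinct sums and double concatenation loop are replaced by a single stable sort of the keys by their summed value (stability reproduces A's insertion-order tie-breaking); the in-place mutation loop is kept identical.
import Mathlib
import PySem

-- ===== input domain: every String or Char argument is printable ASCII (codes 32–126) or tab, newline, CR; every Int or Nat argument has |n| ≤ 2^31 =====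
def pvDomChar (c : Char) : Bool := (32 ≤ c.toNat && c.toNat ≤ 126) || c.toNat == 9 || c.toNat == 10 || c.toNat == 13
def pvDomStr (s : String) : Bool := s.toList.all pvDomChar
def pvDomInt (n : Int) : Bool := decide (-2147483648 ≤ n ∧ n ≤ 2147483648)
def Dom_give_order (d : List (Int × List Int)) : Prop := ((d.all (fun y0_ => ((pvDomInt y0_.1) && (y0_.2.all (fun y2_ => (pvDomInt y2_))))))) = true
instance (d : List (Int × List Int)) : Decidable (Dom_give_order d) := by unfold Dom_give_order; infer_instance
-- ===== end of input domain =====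

-- B replaces A's group-by-sum dict + concatenation by one stable sort of the keys by
-- their summed value. Both A and B mutate the argument dict in place (d[i] = sum(d[i]));
-- the equivalence proved here is about the return value (the mutation is identical anyway).

-- ===== PORT A =====
-- The Python dict holds lists first and ints after the first loop: values are modelled
-- as (List Int ⊕ Int) — Sum.inl = still a list, Sum.inr = already summed. The loop is
-- Option-threaded: none = a raised exception (KeyError on a missing key 1..ld, or a
-- TypeError from sum() / sorted() on mixed values), excluded by Pre_ below.

-- d[i] = sum(d[i]) for i in range(1, ld+1)  (shared verbatim by A and B's first loop)
def sumPhase (dd : PySem.Dict Int (List Int ⊕ Int)) :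
    Option (PySem.Dict Int (List Int ⊕ Int)) :=
  (PySem.List.pyRange 1 ((dd.size : Int) + 1)).foldl
    (fun acc i => acc.bind (fun dd =>
      match dd.get? i with
      | some (Sum.inl xs) => some (dd.insert i (Sum.inr xs.sum))
      | some (Sum.inr _)  => none      -- sum() of an int: TypeError
      | none              => none))    -- KeyError
    (some dd)

-- the items, once every value is an int (Sum.inl left over would make Python's nd
-- mixed-typed and sorted(nd) raise: none, outside Pre_)
def extractInts (items : List (Int × (List Int ⊕ Int))) : Option (List (Int × Int)) :=
  items.foldl (fun acc kv => acc.bind (fun l =>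
    match kv.2 with
    | Sum.inr n => some (l ++ [(kv.1, n)])
    | Sum.inl _ => none)) (some [])

-- nd = {}; for key, value in d.items(): append key under value
def buildNd (e : List (Int × Int)) : PySem.Dict Int (List Int) :=
  e.foldl (fun nd kv =>
    if nd.contains kv.2 then nd.modify kv.2 [] (· ++ [kv.1])
    else nd.insert kv.2 [kv.1]) PySem.Dict.empty

-- snd = sorted(nd); r = []; for i in snd: for j in nd[i]: r.append(j)
def concatGroups (nd : PySem.Dict Int (List Int)) : List Int :=
  (PySem.List.sorted nd.keys (fun x => x)).foldl
    (fun r i => (nd.getD i []).foldl (fun r j => r ++ [j]) r) []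

def give_order (d : List (Int × List Int)) : List Int :=
  match sumPhase (PySem.Dict.ofList (d.map (fun p => (p.1, Sum.inl p.2)))) with
  | none => []                         -- exception: outside Pre_
  | some dd =>
    match extractInts dd.items with
    | none => []
    | some e => concatGroups (buildNd e)

-- ===== PORT B =====
def give_order_alt (d : List (Int × List Int)) : List Int :=
  match sumPhase (PySem.Dict.ofList (d.map (fun p => (p.1, Sum.inl p.2)))) with
  | none => []                         -- exception: outside Pre_
  | some dd =>
    -- sorted(d, key=lambda k: d[k]) : stable sort of the keys by their summed value
    PySem.List.sorted dd.keys
      (fun k => match dd.get? k with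
                | some (Sum.inr n) => n
                | _ => 0)              -- unreachable under Pre_ (k ∈ keys, all values summed)

-- ===== PRECONDITION & SPEC =====
-- Pre_: the dict's keys are exactly 1..len(d) (in any order). Otherwise the first loop
-- raises KeyError (A returns nowhere outside this). Duplicate keys in the association
-- list do not correspond to a distinct Python dict and are excluded as well.
def Pre_give_order (d : List (Int × List Int)) : Prop :=
  (d.map (fun p => p.1)).Perm (PySem.List.pyRange 1 ((d.length : Int) + 1))
instance (d : List (Int × List Int)) : Decidable (Pre_give_order d) := by
  unfold Pre_give_order; infer_instance

def pvWitness_give_order : (List (Int × List Int)) :=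
  [(2, [3, 4]), (1, [7]), (3, [])]

def Spec_give_order (d : List (Int × List Int)) (out : List Int) : Prop := out = give_order_alt d
instance (d : List (Int × List Int)) (out : List Int) : Decidable (Spec_give_order d out) := by unfold Spec_give_order; infer_instance

-- ===== CLAIM (what is proved, stated in full; the proofs are below) =====
def Claim_equal_give_order : Prop := ∀ (d : List (Int × List Int)), Dom_give_order d → Pre_give_order d → Spec_give_order d (give_order d)

-- ===== LEMMAS AND PROOFS =====

theorem pyRange_nodup (a b : Int) : (PySem.List.pyRange a b).Nodup := by
  by_cases h : a < b
  · have : (b - a).toNat = (b - (a+1)).toNat + 1 := by omega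
    rw [PySem.List.pyRange_one_cons h]
    exact List.Nodup.cons (fun hm => by have := PySem.List.mem_pyRange_one.mp hm; omega)
      (pyRange_nodup (a+1) b)
  · have : PySem.List.pyRange a b = [] := by
      rw [List.eq_nil_iff_forall_not_mem]
      intro x hx; have := PySem.List.mem_pyRange_one.mp hx; omega
    simp [this]
termination_by (b - a).toNat
decreasing_by omega

theorem insertBy_append {α : Type} (bf : α → α → Bool) (x : α) (ys zs : List α)
    (h : ∀ y ∈ ys, bf x y = false) :
    PySem.List.insertBy bf x (ys ++ zs) = ys ++ PySem.List.insertBy bf x zs := by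
  induction ys with
  | nil => simp
  | cons y t ih =>
    have hy : bf x y = false := h y (by simp)
    show PySem.List.insertBy bf x (y :: (t ++ zs)) = _
    rw [show PySem.List.insertBy bf x (y :: (t ++ zs))
        = if bf x y then x :: y :: (t ++ zs) else y :: PySem.List.insertBy bf x (t ++ zs) from rfl,
      hy, if_neg (by simp), ih (fun y hy => h y (by simp [hy]))]
    simp

theorem insertBy_all_true {α : Type} (bf : α → α → Bool) (x : α) (ys : List α)
    (h : ∀ y ∈ ys, bf x y = true) :
    PySem.List.insertBy bf x ys = x :: ys := by
  cases ys with
  | nil => simp [PySem.List.insertBy]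
  | cons y t => simp [PySem.List.insertBy, h y (by simp)]

theorem insertBy_map {α β : Type} (f : α → β) (bf : α → α → Bool) (bg : β → β → Bool)
    (hc : ∀ a b : α, bg (f a) (f b) = bf a b) (x : α) (ys : List α) :
    PySem.List.insertBy bg (f x) (ys.map f) = (PySem.List.insertBy bf x ys).map f := by
  induction ys with
  | nil => simp [PySem.List.insertBy]
  | cons y t ih =>
    by_cases hb : bf x y = true
    · simp [PySem.List.insertBy, hc, hb]
    · simp only [Bool.not_eq_true] at hb
      simp [PySem.List.insertBy, hc, hb, ih]

theorem insertBy_congr {α : Type} (bf bf' : α → α → Bool) (x : α) (ys : List α)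
    (h : ∀ y ∈ ys, bf x y = bf' x y) :
    PySem.List.insertBy bf x ys = PySem.List.insertBy bf' x ys := by
  induction ys with
  | nil => rfl
  | cons y t ih =>
    have hy := h y (by simp)
    by_cases hb : bf' x y = true
    · simp [PySem.List.insertBy, hy, hb]
    · simp only [Bool.not_eq_true] at hb
      simp [PySem.List.insertBy, hy, hb, ih (fun y hy => h y (by simp [hy]))]

theorem sorted_map {α β κ : Type} [LT κ] [DecidableLT κ] (f : α → β)
    (key : β → κ) (xs : List α) :
    PySem.List.sorted (xs.map f) key = (PySem.List.sorted xs (fun a => key (f a))).map f := by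
  rw [PySem.List.sorted_eq_foldl_insertBy, PySem.List.sorted_eq_foldl_insertBy]
  suffices h : ∀ acc : List α,
      (xs.map f).foldl (fun acc x => PySem.List.insertBy (fun a b => decide (key a < key b)) x acc) (acc.map f)
      = (xs.foldl (fun acc x => PySem.List.insertBy (fun a b => decide (key (f a) < key (f b))) x acc) acc).map f by
    simpa using h []
  induction xs with
  | nil => intro acc; simp
  | cons x t ih =>
    intro acc
    simp only [List.map_cons, List.foldl_cons]
    rw [insertBy_map f (fun a b => decide (key (f a) < key (f b))) (fun a b => decide (key a < key b)) (fun a b => rfl) x acc]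
    exact ih _

theorem foldl_insertBy_congr {α κ : Type} [LT κ] [DecidableLT κ]
    (k1 k2 : α → κ) (xs : List α) : ∀ acc : List α,
    (∀ a ∈ acc, k1 a = k2 a) → (∀ a ∈ xs, k1 a = k2 a) →
    xs.foldl (fun acc x => PySem.List.insertBy (fun a b => decide (k1 a < k1 b)) x acc) acc
      = xs.foldl (fun acc x => PySem.List.insertBy (fun a b => decide (k2 a < k2 b)) x acc) acc := by
  induction xs with
  | nil => intro _ _ _; rfl
  | cons x t ih =>
    intro acc hacc hxs
    simp only [List.foldl_cons]
    rw [insertBy_congr _ (fun a b => decide (k2 a < k2 b)) x acc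
      (fun y hy => by rw [hxs x (by simp), hacc y hy])]
    refine ih _ (fun a ha => ?_) (fun a ha => hxs a (by simp [ha]))
    rcases (PySem.List.mem_insertBy _ _ _ _).mp ha with h1 | h1
    · exact h1 ▸ hxs x (by simp)
    · exact hacc a h1

theorem sorted_congr_key {α κ : Type} [LT κ] [DecidableLT κ] (xs : List α)
    (k1 k2 : α → κ) (h : ∀ a ∈ xs, k1 a = k2 a) :
    PySem.List.sorted xs k1 = PySem.List.sorted xs k2 := by
  rw [PySem.List.sorted_eq_foldl_insertBy, PySem.List.sorted_eq_foldl_insertBy]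
  exact foldl_insertBy_congr k1 k2 xs [] (by simp) h

theorem flatMap_congr_mem {α β : Type} (l : List α) (f g : α → List β)
    (h : ∀ a ∈ l, f a = g a) : l.flatMap f = l.flatMap g := by
  simp only [List.flatMap]
  rw [List.map_congr_left h]

theorem ins_group_mem (x : Int × Int) (ss : List Int) (g : Int → List (Int × Int))
    (hg : ∀ s p, p ∈ g s → p.2 = s) (hss : ss.Pairwise (· < ·)) (hv : x.2 ∈ ss) :
    PySem.List.insertBy (fun a b => decide (a.2 < b.2)) x (ss.flatMap g)
      = ss.flatMap (fun s => g s ++ if x.2 == s then [x] else []) := by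
  induction ss with
  | nil => cases hv
  | cons s0 rest ih =>
    have hrest : ∀ s ∈ rest, s0 < s := fun s hs => List.rel_of_pairwise_cons hss hs
    rw [List.flatMap_cons, List.flatMap_cons]
    by_cases hv0 : x.2 = s0
    · have hcong : List.flatMap (fun s => g s ++ if x.2 == s then [x] else []) rest
          = List.flatMap g rest :=
        flatMap_congr_mem rest _ g (fun s hs => by
          have hne : x.2 ≠ s := by have := hrest s hs; omega
          simp [hne])
      rw [insertBy_append _ _ _ _ (fun y hy => by
          have h2 := hg s0 y hy
          rw [h2, hv0]; simp),
        insertBy_all_true _ _ _ (fun y hy => by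
          rcases List.mem_flatMap.mp hy with ⟨s, hs, hys⟩
          rw [hg s y hys, hv0]; simp; exact hrest s hs),
        hcong, if_pos (by simp [hv0])]
      simp
    · have hvr : x.2 ∈ rest := by rcases List.mem_cons.mp hv with h | h
                                  · exact absurd h hv0
                                  · exact h
      have h0v : s0 < x.2 := hrest _ hvr
      rw [insertBy_append _ _ _ _ (fun y hy => by
          rw [hg s0 y hy]; simp; omega),
        ih (hss.sublist (List.sublist_cons_self _ _)) hvr, if_neg (by simp [hv0])]
      simp

theorem ins_group_notmem (x : Int × Int) (ss : List Int) (g : Int → List (Int × Int))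
    (hg : ∀ s p, p ∈ g s → p.2 = s) (hss : ss.Pairwise (· < ·)) (hv : x.2 ∉ ss)
    (hgv : g x.2 = []) :
    PySem.List.insertBy (fun a b => decide (a.2 < b.2)) x (ss.flatMap g)
      = (PySem.List.insertBy (fun a b => decide (a < b)) x.2 ss).flatMap
          (fun s => g s ++ if x.2 == s then [x] else []) := by
  induction ss with
  | nil => simp [PySem.List.insertBy, hgv]
  | cons s0 rest ih =>
    have hrest : ∀ s ∈ rest, s0 < s := fun s hs => List.rel_of_pairwise_cons hss hs
    have hne0 : x.2 ≠ s0 := fun h => hv (by simp [h])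
    have hcong : ∀ t : List Int, (∀ s ∈ t, x.2 ≠ s) →
        List.flatMap (fun s => g s ++ if x.2 == s then [x] else []) t = List.flatMap g t :=
      fun t ht => flatMap_congr_mem t _ g (fun s hs => by simp [ht s hs])
    by_cases hlt : x.2 < s0
    · rw [insertBy_all_true _ _ _ (fun y hy => by
          rcases List.mem_flatMap.mp hy with ⟨s, hs, hys⟩
          rw [hg s y hys]
          rcases List.mem_cons.mp hs with h | h
          · simp [h]; omega
          · have := hrest s h; simp; omega),
        insertBy_all_true _ _ _ (fun y hy => by
          rcases List.mem_cons.mp hy with h | h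
          · simp [h, hlt]
          · have := hrest y h; simp; omega)]
      conv_rhs => rw [List.flatMap_cons]
      rw [if_pos (show (x.2 == x.2) = true by simp), hgv,
        hcong (s0 :: rest) (fun s hs => by
          rcases List.mem_cons.mp hs with h | h
          · simp [h, hne0]
          · have := hrest s h; omega)]
      simp
    · have h0v : s0 < x.2 := by omega
      rw [List.flatMap_cons,
        insertBy_append _ _ _ _ (fun y hy => by
          rw [hg s0 y hy]; simp; omega),
        ih (hss.sublist (List.sublist_cons_self _ _)) (fun h => hv (by simp [h]))]
      rw [show PySem.List.insertBy (fun a b => decide (a < b)) x.2 (s0 :: rest)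
          = if decide (x.2 < s0) then x.2 :: s0 :: rest
            else s0 :: PySem.List.insertBy (fun a b => decide (a < b)) x.2 rest from rfl,
        if_neg (by simp [hlt])]
      rw [List.flatMap_cons, if_neg (by simp [hne0])]
      simp

theorem stable_sort_groups (l : List (Int × Int)) :
    PySem.List.sorted l (fun p => p.2)
      = (PySem.List.sorted (PySem.Set.ofList (l.map (fun p => p.2))) (fun x => x)).flatMap
          (fun s => l.filter (fun p => p.2 == s)) := by
  induction l using List.reverseRecOn with
  | nil => simp [PySem.List.sorted, PySem.Set.ofList]
  | append_singleton l x ih =>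
    have hS : PySem.Set.ofList ((l ++ [x]).map (fun p => p.2))
        = PySem.Set.add (PySem.Set.ofList (l.map (fun p => p.2))) x.2 := by
      rw [List.map_append, PySem.Set.ofList_eq_foldl, List.foldl_append,
        ← PySem.Set.ofList_eq_foldl]
      rfl
    have hfil : ∀ s : Int, (l ++ [x]).filter (fun p => p.2 == s)
        = l.filter (fun p => p.2 == s) ++ if x.2 == s then [x] else [] := by
      intro s
      rw [List.filter_append]
      congr 1
      by_cases h : (x.2 == s) = true <;> simp [List.filter, h]
    have hsortapp : PySem.List.sorted (l ++ [x]) (fun p => p.2)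
        = PySem.List.insertBy (fun a b => decide (a.2 < b.2)) x
            (PySem.List.sorted l (fun p => p.2)) := by
      rw [PySem.List.sorted_eq_foldl_insertBy, PySem.List.sorted_eq_foldl_insertBy,
        List.foldl_append]
      rfl
    set S := PySem.Set.ofList (l.map (fun p => p.2)) with hSdef
    have hpair : (PySem.List.sorted S (fun x => x)).Pairwise (· < ·) :=
      PySem.List.sorted_ofList_pairwise_lt _
    have hg : ∀ s (p : Int × Int), p ∈ l.filter (fun p => p.2 == s) → p.2 = s := by
      intro s p hp
      have := (List.mem_filter.mp hp).2
      simpa using this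
    rw [hsortapp, ih, hS]
    by_cases hmem : x.2 ∈ S
    · have hc : S.contains x.2 = true := by
        simp only [PySem.Set.contains, List.contains_iff_mem]; exact hmem
      have hadd : PySem.Set.add S x.2 = S := by
        simp [PySem.Set.add]
        exact hmem
      rw [hadd, ins_group_mem x _ _ hg hpair ((PySem.List.mem_sorted _ _ _ _).mpr hmem)]
      exact flatMap_congr_mem _ _ _ (fun s _ => (hfil s).symm)
    · have hadd : PySem.Set.add S x.2 = S ++ [x.2] := by
        simp only [PySem.Set.add]
        rw [if_neg (by simp [PySem.Set.contains]; exact fun h => hmem (List.contains_iff_mem.mp (by simpa using h)))]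
      have hgv : l.filter (fun p => p.2 == x.2) = [] := by
        rw [List.filter_eq_nil_iff]
        intro p hp hbeq
        exact hmem (by
          rw [hSdef, PySem.Set.mem_ofList]
          exact List.mem_map.mpr ⟨p, hp, by simpa using hbeq⟩)
      have hsorted2 : PySem.List.sorted (S ++ [x.2]) (fun y => y)
          = PySem.List.insertBy (fun a b => decide (a < b)) x.2 (PySem.List.sorted S (fun y => y)) := by
        rw [PySem.List.sorted_eq_foldl_insertBy, PySem.List.sorted_eq_foldl_insertBy,
          List.foldl_append]
        rfl
      rw [hadd, hsorted2,
        ins_group_notmem x _ _ hg hpair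
          (fun h => hmem ((PySem.List.mem_sorted _ _ _ _).mp h)) hgv]
      exact flatMap_congr_mem _ _ _ (fun s _ => (hfil s).symm)

def phase1State (d : List (Int × List Int)) (S : List Int) : PySem.Dict Int (List Int ⊕ Int) :=
  PySem.Dict.mk (d.map (fun p => (p.1, if p.1 ∈ S then Sum.inr p.2.sum else Sum.inl p.2)))

theorem keyval_unique {α β : Type} (l : List (α × β)) (h : (l.map Prod.fst).Nodup)
    {a : α} {b c : β} (h1 : (a, b) ∈ l) (h2 : (a, c) ∈ l) : b = c := by
  induction l with
  | nil => cases h1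
  | cons q t ih =>
    have hq : q.1 ∉ t.map Prod.fst := (List.nodup_cons.mp (by simpa using h)).1
    rcases List.mem_cons.mp h1 with e1 | m1 <;> rcases List.mem_cons.mp h2 with e2 | m2
    · rw [← e1] at e2; exact (Prod.mk.injEq _ _ _ _).mp e2.symm |>.2
    · exact absurd (List.mem_map.mpr ⟨(a, c), m2, by rw [← e1]⟩) hq
    · exact absurd (List.mem_map.mpr ⟨(a, b), m1, by rw [← e2]⟩) hq
    · exact ih (List.nodup_cons.mp (by simpa using h)).2 m1 m2

theorem keys_phase1 (d : List (Int × List Int)) (S : List Int) :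
    (phase1State d S).keys = d.map Prod.fst := by
  simp [phase1State, PySem.Dict.keys, List.map_map]

theorem phase1_loop (d : List (Int × List Int)) (hnd : (d.map Prod.fst).Nodup)
    (ks : List Int) : ∀ S : List Int, ks.Nodup →
    (∀ i ∈ ks, i ∈ d.map Prod.fst ∧ i ∉ S) →
    ks.foldl (fun acc i => acc.bind (fun dd =>
      match dd.get? i with
      | some (Sum.inl xs) => some (dd.insert i (Sum.inr xs.sum))
      | some (Sum.inr _)  => none
      | none              => none)) (some (phase1State d S))
    = some (phase1State d (S ++ ks)) := by
  induction ks with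
  | nil => intro S _ _; simp
  | cons i ks' ih =>
    intro S hks hmem
    obtain ⟨p, hp, hp1⟩ := List.mem_map.mp (hmem i (by simp)).1
    have hiS : i ∉ S := (hmem i (by simp)).2
    have hitem : (i, (Sum.inl p.2 : List Int ⊕ Int)) ∈ (phase1State d S).items :=
      List.mem_map.mpr ⟨p, hp, by rw [hp1]; simp [hiS]⟩
    have hget : (phase1State d S).get? i = some (Sum.inl p.2) :=
      PySem.Dict.get?_of_mem_items _ hitem (by rw [keys_phase1]; exact hnd)
    have hcont : (phase1State d S).contains i = true :=
      (PySem.Dict.contains_iff_mem_keys _ _).mpr (by rw [keys_phase1]; exact List.mem_map.mpr ⟨p, hp, hp1⟩)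
    have hins : (phase1State d S).insert i (Sum.inr p.2.sum) = phase1State d (S ++ [i]) := by
      apply PySem.Dict.ext
      rw [PySem.Dict.items_insert_of_contains _ _ hcont]
      show ((d.map _).map _) = _
      rw [List.map_map]
      apply List.map_congr_left
      intro q hq
      by_cases hqi : q.1 = i
      · have : q.2 = p.2 := keyval_unique d hnd (show (i, q.2) ∈ d by rw [← hqi]; simpa using hq) (show (i, p.2) ∈ d by rw [← hp1]; simpa using hp)
        simp [hqi, hiS, this]
      · simp [hqi, Function.comp]
    rw [List.foldl_cons, Option.bind_some, hget]
    show ks'.foldl _ (some ((phase1State d S).insert i (Sum.inr p.2.sum))) = _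
    rw [hins, ih (S ++ [i]) (List.nodup_cons.mp hks).2 (fun j hj => by
      refine ⟨(hmem j (by simp [hj])).1, ?_⟩
      have hji : j ≠ i := fun h => (List.nodup_cons.mp hks).1 (h ▸ hj)
      have := (hmem j (by simp [hj])).2
      simp [this, hji])]
    simp

theorem extract_items_aux (l acc : List (Int × Int)) :
    (l.map (fun q => (q.1, (Sum.inr q.2 : List Int ⊕ Int)))).foldl
      (fun acc kv => acc.bind (fun l' =>
        match kv.2 with
        | Sum.inr n => some (l' ++ [(kv.1, n)])
        | Sum.inl _ => none)) (some acc) = some (acc ++ l) := by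
  induction l generalizing acc with
  | nil => simp
  | cons q t ih => simpa using ih (acc ++ [q])

theorem extract_items (l : List (Int × Int)) :
    extractInts (l.map (fun q => (q.1, (Sum.inr q.2 : List Int ⊕ Int)))) = some l := by
  unfold extractInts
  simpa using extract_items_aux l []

theorem sumPhase_eq (d : List (Int × List Int)) (hpre : Pre_give_order d) :
    sumPhase (PySem.Dict.ofList (d.map (fun p => (p.1, Sum.inl p.2))))
      = some (PySem.Dict.mk (d.map (fun p => (p.1, Sum.inr p.2.sum)))) := by
  have hnd : (d.map Prod.fst).Nodup :=
    hpre.nodup_iff.mpr (pyRange_nodup 1 ((d.length : Int) + 1))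
  have hofl : PySem.Dict.ofList (d.map (fun p => (p.1, Sum.inl p.2))) = phase1State d [] := by
    apply PySem.Dict.ext
    show ((d.map (fun p => (p.1, (Sum.inl p.2 : List Int ⊕ Int)))).foldl
      (fun acc p => acc.insert p.1 p.2) PySem.Dict.empty).items = _
    rw [PySem.Dict.items_foldl_insert_fresh _ Prod.fst Prod.snd PySem.Dict.empty
      (by intro a _; simp [PySem.Dict.contains_empty])
      (by rw [List.map_map]; exact hnd)]
    simp [phase1State, PySem.Dict.empty, List.map_map, Function.comp]
  have hsize : (PySem.Dict.ofList (d.map (fun p => (p.1, (Sum.inl p.2 : List Int ⊕ Int))))).size = d.length := by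
    rw [hofl]
    simp [phase1State, PySem.Dict.size]
  unfold sumPhase
  rw [hsize, hofl,
    phase1_loop d hnd (PySem.List.pyRange 1 ((d.length : Int) + 1)) []
      (pyRange_nodup _ _)
      (fun i hi => ⟨(List.Perm.mem_iff hpre).mpr hi, by simp⟩)]
  congr 1
  apply PySem.Dict.ext
  show List.map _ d = List.map _ d
  apply List.map_congr_left
  intro p hp
  have : p.1 ∈ PySem.List.pyRange 1 ((d.length : Int) + 1) :=
    (List.Perm.mem_iff hpre).mp (List.mem_map.mpr ⟨p, hp, rfl⟩)
  simp [this]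

theorem A_eval (d : List (Int × List Int)) (hpre : Pre_give_order d) :
    give_order d
      = (PySem.List.sorted (d.map (fun p => (p.1, p.2.sum))) (fun p => p.2)).map Prod.fst := by
  set e : List (Int × Int) := d.map (fun p => (p.1, p.2.sum)) with he
  unfold give_order
  rw [sumPhase_eq d hpre]
  have hitems : (PySem.Dict.mk (d.map (fun p => (p.1, (Sum.inr p.2.sum : List Int ⊕ Int))))).items
      = e.map (fun q => (q.1, (Sum.inr q.2 : List Int ⊕ Int))) := by
    simp [he, List.map_map]
  show (match extractInts (PySem.Dict.mk
      (d.map (fun p => (p.1, (Sum.inr p.2.sum : List Int ⊕ Int))))).items with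
    | none => []
    | some e => concatGroups (buildNd e)) = _
  rw [hitems, extract_items e]
  show concatGroups (buildNd e) = _
  -- the if-step of buildNd is always a modify
  have hstep : buildNd e
      = (e.map Prod.swap).foldl (fun nd p => nd.modify p.1 [] (· ++ [p.2])) PySem.Dict.empty := by
    unfold buildNd
    conv_rhs => rw [List.foldl_map]
    apply PySem.List.foldl_congr_mem
    intro nd kv _
    by_cases hc : nd.contains kv.2 = true
    · simp [hc, Prod.swap]
    · simp only [Bool.not_eq_true] at hc
      simp [hc, Prod.swap, PySem.Dict.modify,
        PySem.Dict.getD_of_not_contains _ _ hc]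
  have hkeys : (buildNd e).keys = PySem.Set.ofList (e.map (fun p => p.2)) := by
    rw [hstep, PySem.Dict.keys_foldl_modify_key (e.map Prod.swap) Prod.fst []
      (fun _ p => (· ++ [p.2])) PySem.Dict.empty]
    simp [PySem.Set.update, PySem.Set.ofList_eq_foldl, List.map_map]
    rfl
  have hgetD : ∀ s, (buildNd e).getD s [] = (e.filter (fun p => p.2 == s)).map Prod.fst := by
    intro s
    rw [hstep, PySem.Dict.getD_foldl_modify_append (e.map Prod.swap) PySem.Dict.empty s]
    simp only [List.filter_map, List.map_map]
    rfl
  unfold concatGroups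
  rw [PySem.List.foldl_congr_mem (PySem.List.sorted (buildNd e).keys (fun x => x))
    (fun r i => ((buildNd e).getD i []).foldl (fun r j => r ++ [j]) r)
    (fun r i => r ++ (buildNd e).getD i []) []
    (fun r i _ => PySem.List.foldl_append_singleton_eq_self _ _)]
  rw [PySem.List.foldl_append_eq_flatMap, List.nil_append, hkeys,
    flatMap_congr_mem _ _ _ (fun s _ => hgetD s),
    ← List.map_flatMap, ← stable_sort_groups e]

theorem B_eval (d : List (Int × List Int)) (hpre : Pre_give_order d) :
    give_order_alt d
      = (PySem.List.sorted (d.map (fun p => (p.1, p.2.sum))) (fun p => p.2)).map Prod.fst := by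
  have hnd : (d.map Prod.fst).Nodup :=
    hpre.nodup_iff.mpr (pyRange_nodup 1 ((d.length : Int) + 1))
  set e : List (Int × Int) := d.map (fun p => (p.1, p.2.sum)) with he
  unfold give_order_alt
  rw [sumPhase_eq d hpre]
  set DD := PySem.Dict.mk (d.map (fun p => (p.1, (Sum.inr p.2.sum : List Int ⊕ Int)))) with hDD
  show PySem.List.sorted DD.keys
      (fun k => match DD.get? k with
                | some (Sum.inr n) => n
                | _ => 0) = _
  have hkeys : DD.keys = e.map Prod.fst := by
    simp [hDD, he, PySem.Dict.keys, List.map_map]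
  have hkeysnd : DD.keys.Nodup := by
    rw [hkeys, he, List.map_map]
    exact hnd
  have hget : ∀ p : Int × Int, p ∈ e → DD.get? p.1 = some (Sum.inr p.2) := by
    intro p hp
    apply PySem.Dict.get?_of_mem_items _ _ hkeysnd
    show (p.1, Sum.inr p.2) ∈ DD.items
    have : DD.items = e.map (fun q => (q.1, (Sum.inr q.2 : List Int ⊕ Int))) := by
      simp [hDD, he, List.map_map]
    rw [this]
    exact List.mem_map.mpr ⟨p, hp, rfl⟩
  rw [hkeys, sorted_map Prod.fst _ e]
  congr 1
  apply sorted_congr_key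
  intro p hp
  rw [hget p hp]

-- ===== VERDICT (by name: the statement is the Claim_ definition above) =====
theorem give_order_spec : Claim_equal_give_order := by
  unfold Claim_equal_give_order
  intro d _ hpre
  unfold Spec_give_order
  rw [A_eval d hpre, B_eval d hpre]
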